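-- pv_equiv track=rewrite | github.com/sdrasco/freedact | src/redactor/pseudo/case_preserver.py | letter_punct_profile
-- ===== SOURCE A (Python) =====
-- from typing import List, Optional, Sequence, Tuple
--
-- def letter_punct_profile(source: str) -> List[Tuple[int, str]]:
--     """Return interior punctuation positions for ``source``.
--
--     The result is a list of ``(letter_offset, punct)`` tuples where
--     ``letter_offset`` counts only alphabetic characters.  Punctuation sequences
--     (including spaces) between letters are recorded.  If ``source`` ends with
--     punctuation after the final letter it is also included.
--     """
--
--     profile: List[Tuple[int, str]] = []
--     letter_offset = 0
--     buf = ""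
--     for ch in source:
--         if ch.isalpha():
--             if buf:
--                 profile.append((letter_offset, buf))
--                 buf = ""
--             letter_offset += 1
--         else:
--             buf += ch
--     if buf:
--         profile.append((letter_offset, buf))
--     return profile
-- ===== SOURCE B (Python) =====
-- def letter_punct_profile(source):
--     """Run-based scan: jump over maximal non-letter runs with an inner index
--     scan and slice them out, instead of building a char-by-char buffer."""
--     profile = []
--     n = len(source)
--     i = 0
--     letters = 0
--     while i < n:
--         if source[i].isalpha():
--             letters += 1
--             i += 1
--         else:
--             j = i
--             while j < n and not source[j].isalpha():
--                 j += 1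
--             profile.append((letters, source[i:j]))
--             i = j
--     return profile
-- ===== Notes on version B (the rewrite author's own statement) =====
-- stated objective: alternative
-- what changed: B replaces A's per-character buffer accumulation with a run-based two-level scan: an inner loop finds the end of each maximal non-letter run and a slice emits it in one step.
import Mathlib
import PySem

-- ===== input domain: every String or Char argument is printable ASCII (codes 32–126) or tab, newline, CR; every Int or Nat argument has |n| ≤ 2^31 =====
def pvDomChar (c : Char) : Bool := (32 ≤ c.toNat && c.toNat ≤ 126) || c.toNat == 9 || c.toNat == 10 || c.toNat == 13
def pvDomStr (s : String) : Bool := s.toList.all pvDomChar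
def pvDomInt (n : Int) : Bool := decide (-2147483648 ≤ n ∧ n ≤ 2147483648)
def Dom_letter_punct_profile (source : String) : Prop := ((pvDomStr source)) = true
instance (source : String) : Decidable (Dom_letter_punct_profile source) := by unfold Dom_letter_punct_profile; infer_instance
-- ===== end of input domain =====

-- B replaces A's per-character buffer accumulation with a run-based scan that
-- slices out each maximal non-letter run in one step (objective: alternative).

-- ===== PORT A =====
-- A's loop over the characters: state (profile, letter_offset, buf), exactly A's branches.
def lppGoA : List Char → List (Int × String) → Int → List Char → List (Int × String)
  | [], profile, off, buf =>
      if buf.isEmpty then profile else profile ++ [(off, String.ofList buf)]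
  | c :: rest, profile, off, buf =>
      if PySem.Chars.isalpha c then
        lppGoA rest (if buf.isEmpty then profile else profile ++ [(off, String.ofList buf)]) (off + 1) []
      else
        lppGoA rest profile off (buf ++ [c])

def letter_punct_profile (source : String) : List (Int × String) :=
  lppGoA source.toList [] 0 []

-- ===== PORT B =====
-- B's outer while loop; the inner 'while j < n and not isalpha' + slice source[i:j]
-- becomes takeWhile/dropWhile of the non-letter run.
def lppGoB : List Char → Int → List (Int × String)
  | [], _ => []
  | c :: rest, letters =>
      if PySem.Chars.isalpha c then
        lppGoB rest (letters + 1)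
      else
        (letters, String.ofList (c :: rest.takeWhile (fun x => !PySem.Chars.isalpha x)))
          :: lppGoB (rest.dropWhile (fun x => !PySem.Chars.isalpha x)) letters
termination_by cs => cs.length
decreasing_by
  · simp
  · have := List.length_dropWhile_le (p := fun x => !PySem.Chars.isalpha x) (l := rest)
    simp; omega

def letter_punct_profile_alt (source : String) : List (Int × String) :=
  lppGoB source.toList 0

-- ===== PRECONDITION & SPEC =====
def Spec_letter_punct_profile (source : String) (out : List (Int × String)) : Prop := out = letter_punct_profile_alt source
instance (source : String) (out : List (Int × String)) : Decidable (Spec_letter_punct_profile source out) := by unfold Spec_letter_punct_profile; infer_instance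

-- ===== CLAIM (what is proved, stated in full; the proofs are below) =====
def Claim_equal_letter_punct_profile : Prop := ∀ (source : String), Dom_letter_punct_profile source → Spec_letter_punct_profile source (letter_punct_profile source)

-- ===== LEMMAS AND PROOFS =====

-- A's pending buffer 'buf' merges with the leading non-letter run of the rest.
theorem lppGoA_eq (cs : List Char) :
    ∀ (profile : List (Int × String)) (off : Int) (buf : List Char),
      lppGoA cs profile off buf =
        profile ++
          (if buf.isEmpty then lppGoB cs off
           else (off, String.ofList (buf ++ cs.takeWhile (fun x => !PySem.Chars.isalpha x)))
                  :: lppGoB (cs.dropWhile (fun x => !PySem.Chars.isalpha x)) off) := by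
  induction cs with
  | nil =>
      intro profile off buf
      by_cases hb : buf.isEmpty <;> simp [lppGoA, lppGoB, hb]
  | cons c rest ih =>
      intro profile off buf
      by_cases hc : PySem.Chars.isalpha c
      · by_cases hb : buf.isEmpty <;>
          simp [lppGoA, lppGoB, hc, hb, ih]
      · have h1 : lppGoA (c :: rest) profile off buf = lppGoA rest profile off (buf ++ [c]) := by
          simp [lppGoA, hc]
        rw [h1, ih]
        have hb' : (buf ++ [c]).isEmpty = false := by simp
        by_cases hb : buf.isEmpty <;>
          simp_all [lppGoB, List.isEmpty_iff]

-- ===== VERDICT (by name: the statement is the Claim_ definition above) =====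
theorem letter_punct_profile_spec : Claim_equal_letter_punct_profile := by
  intro source _
  unfold Spec_letter_punct_profile letter_punct_profile letter_punct_profile_alt
  simp [lppGoA_eq]
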